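-- pv_equiv track=rewrite | github.com/marcosd4h/DeepExtractRuntime | helpers/rpc_stub_parser.py | _simplify_type
-- ===== SOURCE A (Python) =====
-- _WRAPPER_PREFIXES = (
--     "NtApiDotNet.Ndr.Marshal.NdrEmbeddedPointer",
--     "NtApiDotNet.Ndr.Marshal.NdrPipe",
--     "System.Nullable",
-- )
--
-- _NS_PREFIXES = (
--     "NtApiDotNet.Ndr.Marshal.",
--     "NtApiDotNet.Win32.Rpc.Client.",
--     "NtApiDotNet.Win32.Rpc.",
--     "NtApiDotNet.",
-- )
--
-- def _simplify_type(raw: str) -> tuple[str, bool, bool]: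
--     """Simplify a fully-qualified C# type to a short form.
--
--     Returns ``(simplified_name, is_pointer, is_pipe)``.
--     Unwraps NdrEmbeddedPointer<T>, NdrPipe<T>, and System.Nullable<T>.
--     """
--     t = raw.strip()
--     is_pointer = False
--     is_pipe = False
--
--     for prefix in _WRAPPER_PREFIXES:
--         if t.startswith(prefix):
--             bracket_start = t.find("<", len(prefix))
--             if bracket_start >= 0 and t.endswith(">"):
--                 inner = t[bracket_start + 1 : -1]
--                 if "NdrEmbeddedPointer" in prefix:
--                     is_pointer = True
--                 elif "NdrPipe" in prefix:
--                     is_pipe = True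
--                 inner_simplified, inner_ptr, inner_pipe = _simplify_type(inner)
--                 return inner_simplified, is_pointer or inner_ptr, is_pipe or inner_pipe
--
--     for ns in _NS_PREFIXES:
--         if t.startswith(ns):
--             t = t[len(ns):]
--             break
--
--     if "IntPtr" in raw and not is_pointer:
--         is_pointer = True
--
--     return t, is_pointer, is_pipe
-- ===== SOURCE B (Python) =====
-- _WRAPPER_PREFIXES = (
--     "NtApiDotNet.Ndr.Marshal.NdrEmbeddedPointer",
--     "NtApiDotNet.Ndr.Marshal.NdrPipe",
--     "System.Nullable",
-- )
--
-- _NS_PREFIXES = (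
--     "NtApiDotNet.Ndr.Marshal.",
--     "NtApiDotNet.Win32.Rpc.Client.",
--     "NtApiDotNet.Win32.Rpc.",
--     "NtApiDotNet.",
-- )
--
--
-- def _unwrap_once(t):
--     """Return (inner, wrapped_ptr, wrapped_pipe) for the first wrapper prefix
--     of t whose bracket condition holds, or None if no wrapper applies."""
--     for prefix in _WRAPPER_PREFIXES:
--         if t.startswith(prefix):
--             b = t.find("<", len(prefix))
--             if b >= 0 and t.endswith(">"):
--                 is_ptr = "NdrEmbeddedPointer" in prefix
--                 return (t[b + 1:-1], is_ptr,
--                         (not is_ptr) and "NdrPipe" in prefix)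
--     return None
--
--
-- def _simplify_type(raw):
--     is_pointer = False
--     is_pipe = False
--     cur = raw
--     t = cur.strip()
--     while True:
--         step = _unwrap_once(t)
--         if step is None:
--             break
--         cur, wp, wq = step
--         is_pointer = is_pointer or wp
--         is_pipe = is_pipe or wq
--         t = cur.strip()
--     for ns in _NS_PREFIXES:
--         if t.startswith(ns):
--             t = t[len(ns):]
--             break
--     if "IntPtr" in cur and not is_pointer:
--         is_pointer = True
--     return t, is_pointer, is_pipe
-- ===== Notes on version B (the rewrite author's own statement) =====
-- stated objective: alternative
-- what changed: A's recursive self-call per unwrapped wrapper layer is replaced by an iterative while-loop that peels one wrapper per iteration with boolean accumulators for is_pointer/is_pipe, applying the namespace-strip and IntPtr check once at the end against the innermost unstripped string.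
import Mathlib
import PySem

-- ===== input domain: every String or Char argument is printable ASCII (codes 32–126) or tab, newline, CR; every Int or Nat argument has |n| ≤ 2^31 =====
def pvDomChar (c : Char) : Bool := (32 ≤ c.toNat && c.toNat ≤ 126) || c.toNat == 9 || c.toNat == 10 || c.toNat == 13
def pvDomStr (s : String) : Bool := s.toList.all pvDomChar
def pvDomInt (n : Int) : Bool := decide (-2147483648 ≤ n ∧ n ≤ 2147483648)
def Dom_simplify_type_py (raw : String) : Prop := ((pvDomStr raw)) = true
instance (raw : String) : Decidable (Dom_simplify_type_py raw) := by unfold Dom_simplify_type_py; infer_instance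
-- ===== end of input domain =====

-- B rewrites A's recursion as an iterative peel-one-wrapper-per-step loop with boolean
-- accumulators (objective: alternative decomposition, same cost).

-- ===== PORT A =====
def pvWrapperPrefixes : List (List Char) :=
  ["NtApiDotNet.Ndr.Marshal.NdrEmbeddedPointer".toList,
   "NtApiDotNet.Ndr.Marshal.NdrPipe".toList,
   "System.Nullable".toList]

def pvNsPrefixes : List (List Char) :=
  ["NtApiDotNet.Ndr.Marshal.".toList,
   "NtApiDotNet.Win32.Rpc.Client.".toList,
   "NtApiDotNet.Win32.Rpc.".toList,
   "NtApiDotNet.".toList]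

-- A's namespace for-loop with break
def pvNsStripA : List (List Char) → List Char → List Char
  | [], t => t
  | ns :: rest, t =>
      if PySem.Chars.startswith t ns then PySem.List.slice t (some (ns.length : Int)) none
      else pvNsStripA rest t

-- A's wrapper for-loop: the first prefix whose bracket test holds, with the local
-- flags and the inner slice it would recurse on (none = loop falls through)
def pvScanA : List (List Char) → List Char → Option (List Char × Bool × Bool)
  | [], _ => none
  | p :: ps, t =>
      if PySem.Chars.startswith t p then
        let b := PySem.Chars.findFrom t "<".toList (p.length : Int) none
        if 0 ≤ b ∧ PySem.Chars.endswith t ">".toList then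
          let isPtr := PySem.Chars.isIn "NdrEmbeddedPointer".toList p
          let isPipe := if isPtr then false else PySem.Chars.isIn "NdrPipe".toList p
          some (PySem.List.slice t (some (b + 1)) (some (-1)), isPtr, isPipe)
        else pvScanA ps t
      else pvScanA ps t

-- A's recursion, fueled only to make it total (each step strictly shrinks the string,
-- so fuel = raw.length + 1 is never exhausted)
def pvGoA : Nat → List Char → List Char × Bool × Bool
  | 0, _ => ([], false, false)
  | fuel + 1, raw =>
      let t := PySem.Chars.strip raw
      match pvScanA pvWrapperPrefixes t with
      | some (inner, wp, wq) =>
          let (s, ip, iq) := pvGoA fuel inner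
          (s, wp || ip, wq || iq)
      | none =>
          let t2 := pvNsStripA pvNsPrefixes t
          (t2, PySem.Chars.isIn "IntPtr".toList raw, false)

def simplify_type_py (raw : String) : String × Bool × Bool :=
  let (t, p, q) := pvGoA (raw.toList.length + 1) raw.toList
  (String.ofList t, p, q)

-- ===== PORT B =====
-- Source B's _unwrap_once helper
def pvUnwrapOnceB : List (List Char) → List Char → Option (List Char × Bool × Bool)
  | [], _ => none
  | p :: ps, t =>
      if PySem.Chars.startswith t p then
        let b := PySem.Chars.findFrom t "<".toList (p.length : Int) none
        if 0 ≤ b ∧ PySem.Chars.endswith t ">".toList then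
          let isPtr := PySem.Chars.isIn "NdrEmbeddedPointer".toList p
          some (PySem.List.slice t (some (b + 1)) (some (-1)), isPtr,
                !isPtr && PySem.Chars.isIn "NdrPipe".toList p)
        else pvUnwrapOnceB ps t
      else pvUnwrapOnceB ps t

def pvNsStripB : List (List Char) → List Char → List Char
  | [], t => t
  | ns :: rest, t =>
      if PySem.Chars.startswith t ns then PySem.List.slice t (some (ns.length : Int)) none
      else pvNsStripB rest t

-- Source B's while-loop with accumulators (fuel only for totality, never exhausted)
def pvLoopB : Nat → List Char → List Char → Bool → Bool → List Char × Bool × Bool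
  | 0, _, _, isp, ipp => ([], isp, ipp)
  | fuel + 1, cur, t, isp, ipp =>
      match pvUnwrapOnceB pvWrapperPrefixes t with
      | some (inner, wp, wq) =>
          pvLoopB fuel inner (PySem.Chars.strip inner) (isp || wp) (ipp || wq)
      | none =>
          let t2 := pvNsStripB pvNsPrefixes t
          let isp2 := if !isp && PySem.Chars.isIn "IntPtr".toList cur then true else isp
          (t2, isp2, ipp)

def simplify_type_py_alt (raw : String) : String × Bool × Bool :=
  let (t, p, q) := pvLoopB (raw.toList.length + 1) raw.toList (PySem.Chars.strip raw.toList) false false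
  (String.ofList t, p, q)

-- ===== PRECONDITION & SPEC =====
def Spec_simplify_type_py (raw : String) (out : String × Bool × Bool) : Prop := out = simplify_type_py_alt raw
instance (raw : String) (out : String × Bool × Bool) : Decidable (Spec_simplify_type_py raw out) := by unfold Spec_simplify_type_py; infer_instance

-- ===== CLAIM (what is proved, stated in full; the proofs are below) =====
def Claim_equal_simplify_type_py : Prop := ∀ (raw : String), Dom_simplify_type_py raw → Spec_simplify_type_py raw (simplify_type_py raw)

-- ===== LEMMAS AND PROOFS =====

theorem pvScan_eq (ps : List (List Char)) (t : List Char) :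
    pvUnwrapOnceB ps t = pvScanA ps t := by
  induction ps with
  | nil => rfl
  | cons p ps ih =>
      simp only [pvUnwrapOnceB, pvScanA]
      by_cases h1 : PySem.Chars.startswith t p = true
      · rw [if_pos h1, if_pos h1]
        by_cases h2 : (0 ≤ PySem.Chars.findFrom t "<".toList (p.length : Int) ∧
            PySem.Chars.endswith t ">".toList = true)
        · rw [if_pos h2, if_pos h2]
          cases hp : PySem.Chars.isIn "NdrEmbeddedPointer".toList p <;> simp [hp]
        · rw [if_neg h2, if_neg h2]; exact ih
      · rw [if_neg h1, if_neg h1]; exact ih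

theorem pvNsStrip_eq (ns : List (List Char)) (t : List Char) :
    pvNsStripB ns t = pvNsStripA ns t := by
  induction ns with
  | nil => rfl
  | cons n rest ih => simp only [pvNsStripB, pvNsStripA]; split_ifs <;> simp [ih]

theorem pvLoop_eq (fuel : Nat) : ∀ (cur : List Char) (isp ipp : Bool),
    pvLoopB fuel cur (PySem.Chars.strip cur) isp ipp =
      (let (t, p, q) := pvGoA fuel cur; (t, isp || p, ipp || q)) := by
  induction fuel with
  | zero => intro cur isp ipp; simp [pvLoopB, pvGoA]
  | succ fuel ih =>
      intro cur isp ipp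
      simp only [pvLoopB, pvGoA, pvScan_eq]
      cases h : pvScanA pvWrapperPrefixes (PySem.Chars.strip cur) with
      | none =>
          simp only []
          cases hi : PySem.Chars.isIn "IntPtr".toList cur <;> cases isp <;>
            simp [pvNsStrip_eq]
      | some v =>
          obtain ⟨inner, wp, wq⟩ := v
          simp only []
          rw [ih inner (isp || wp) (ipp || wq)]
          cases hg : pvGoA fuel inner with
          | mk s r =>
              obtain ⟨ip, iq⟩ := r
              simp [Bool.or_assoc]

-- ===== VERDICT (by name: the statement is the Claim_ definition above) =====
theorem simplify_type_py_spec : Claim_equal_simplify_type_py := by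
  intro raw _
  unfold Spec_simplify_type_py simplify_type_py simplify_type_py_alt
  rw [pvLoop_eq]
  cases h : pvGoA (raw.toList.length + 1) raw.toList with
  | mk t r => obtain ⟨p, q⟩ := r; simp
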